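-- pv_equiv track=rewrite | github.com/virbcal/py-acctauth | ceutils/ufilefunc.py | vsiper
-- ===== SOURCE A (Python) =====
-- def genans(v=0):
--     """ Generate sorted AlpaNumericSpecial chars list """
--     alo = aup = ans = ''
--     spc = "`~!@#$%^&()_-+={}[];',"
--     if v==2:
--        spc = spc+' .'                    # incl name/address
--     if v==3:
--        spc = spc+'.'                     # incl email
--     num = "0123456789"
--     for i in range(ord('a'),ord('z')+1):
--         alo += chr(i)
--     for i in range(ord('A'),ord('Z')+1):
--         aup += chr(i)
--     srtd = sorted(spc+num+aup+alo)
--     for i in srtd: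
--         ans += i
--     return ans
--
-- def vsiper(ptxt='test', key=21, v=0):
--     """ The Virbcal Cipher Encryption algorithm """
--     ans = genans(v)
--     ansl = len(ans)
--     ky2 = 0
--     cipher_text = ""
--     for letter in ptxt:
--         idx = ans.find(letter)
--         if idx == -1:
--             return ''
--         ky2 += 1
--         nidx = (idx + key - ky2*7//2) % ansl
--         cipher_text += ans[nidx]
--     return cipher_text
-- ===== SOURCE B (Python) =====
-- def genans(v=0):
--     """ Generate sorted AlpaNumericSpecial chars list """
--     alo = aup = ans = ''
--     spc = "`~!@#$%^&()_-+={}[];',"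
--     if v==2:
--        spc = spc+' .'                    # incl name/address
--     if v==3:
--        spc = spc+'.'                     # incl email
--     num = "0123456789"
--     for i in range(ord('a'),ord('z')+1):
--         alo += chr(i)
--     for i in range(ord('A'),ord('Z')+1):
--         aup += chr(i)
--     srtd = sorted(spc+num+aup+alo)
--     for i in srtd:
--         ans += i
--     return ans
--
-- def vsiper(ptxt='test', key=21, v=0):
--     """ Virbcal Cipher: binary search on the sorted alphabet, string consumed back-to-front """
--     ans = genans(v)
--     ansl = len(ans)
--
--     def locate(c):
--         # ans is sorted, so binary-search the index of c (-1 if absent)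
--         lo, hi = 0, ansl
--         while lo < hi:
--             mid = (lo + hi) // 2
--             if ans[mid] < c:
--                 lo = mid + 1
--             else:
--                 hi = mid
--         if lo < ansl and ans[lo] == c:
--             return lo
--         return -1
--
--     out = []
--     i = len(ptxt)
--     while i > 0:
--         i -= 1
--         idx = locate(ptxt[i])
--         if idx == -1:
--             return ''
--         out.append(ans[(idx + key - (i + 1) * 7 // 2) % ansl])
--     out.reverse()
--     return ''.join(out)
-- ===== Notes on version B (the rewrite author's own statement) =====
-- stated objective: alternative
-- what changed: A's single forward loop that calls the linear ans.find for each character is replaced by a hand-written binary search on the sorted alphabet (O(log m) per lookup) driving a back-to-front while-loop that appends cipher characters and reverses once at the end; genans is unchanged.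
import Mathlib
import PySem

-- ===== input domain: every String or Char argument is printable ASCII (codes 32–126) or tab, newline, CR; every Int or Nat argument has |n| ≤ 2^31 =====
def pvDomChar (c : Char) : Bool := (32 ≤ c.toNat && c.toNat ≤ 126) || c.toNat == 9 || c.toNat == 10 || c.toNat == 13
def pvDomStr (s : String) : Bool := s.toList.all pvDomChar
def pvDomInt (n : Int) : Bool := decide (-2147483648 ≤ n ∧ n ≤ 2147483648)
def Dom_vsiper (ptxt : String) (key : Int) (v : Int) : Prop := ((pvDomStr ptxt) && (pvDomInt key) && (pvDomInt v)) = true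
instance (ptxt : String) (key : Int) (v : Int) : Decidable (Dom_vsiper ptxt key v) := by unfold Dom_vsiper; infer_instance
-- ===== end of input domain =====

-- B replaces A's forward scan with repeated linear ans.find by a hand-written binary search
-- on the sorted alphabet and a back-to-front while-loop that appends and finally reverses
-- (objective: alternative).

-- ===== PORT A =====
-- genans, shared module helper (B's genans is identical)
def genansChars (v : Int) : List Char :=
  let spc0 := "`~!@#$%^&()_-+={}[];',".toList
  let spc1 := if v = 2 then spc0 ++ " .".toList else spc0
  let spc2 := if v = 3 then spc1 ++ ".".toList else spc1
  let num := "0123456789".toList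
  let alo := (PySem.List.pyRange 97 123 1).foldl (fun s i => s ++ [Char.ofNat i.toNat]) []
  let aup := (PySem.List.pyRange 65 91 1).foldl (fun s i => s ++ [Char.ofNat i.toNat]) []
  let srtd := PySem.List.sorted (spc2 ++ num ++ aup ++ alo) (fun c => c) false
  srtd.foldl (fun acc c => acc ++ [c]) []

-- A's for-loop with early 'return ""' on a character missing from ans
def vsiperLoop (ans : List Char) (ansl key : Int) : List Char → Int → List Char → List Char
  | [], _, acc => acc
  | c :: rest, ky2, acc =>
    let idx := PySem.Chars.find ans [c]
    if idx = -1 then []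
    else
      let ky2' := ky2 + 1
      let nidx := PySem.Int.mod (idx + key - PySem.Int.floordiv (ky2' * 7) 2) ansl
      vsiperLoop ans ansl key rest ky2' (acc ++ [PySem.List.pyGetD ans nidx ' '])

def vsiper (ptxt : String) (key : Int) (v : Int) : String :=
  let ans := genansChars v
  let ansl : Int := ans.length
  String.ofList (vsiperLoop ans ansl key ptxt.toList 0 [])

-- ===== PORT B =====
-- the 'while lo < hi' of B's locate; the Nat argument is pure fuel making the loop total
-- (it starts at (hi-lo).toNat and hi-lo shrinks every iteration, so it never runs out)
def locateGo (ans : List Char) (c : Char) : Nat → Int → Int → Int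
  | 0, lo, _ => lo
  | fuel + 1, lo, hi =>
    if lo < hi then
      let mid := PySem.Int.floordiv (lo + hi) 2
      if PySem.List.pyGetD ans mid ' ' < c then locateGo ans c fuel (mid + 1) hi
      else locateGo ans c fuel lo mid
    else lo

-- B's locate: binary search on the sorted ans, -1 if absent
def locate (ans : List Char) (ansl : Int) (c : Char) : Int :=
  let lo := locateGo ans c (ansl - 0).toNat 0 ansl
  if lo < ansl ∧ PySem.List.pyGetD ans lo ' ' = c then lo else -1

-- B's 'while i > 0: i -= 1; …' consuming ptxt back-to-front, appending then reversing
def vsiperBack (ans : List Char) (ansl key : Int) (pt : List Char) : Nat → List Char → List Char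
  | 0, out => out.reverse
  | Nat.succ i, out =>
    let idx := locate ans ansl (PySem.List.pyGetD pt (i : Int) ' ')
    if idx = -1 then []
    else vsiperBack ans ansl key pt i
      (out ++ [PySem.List.pyGetD ans (PySem.Int.mod (idx + key - PySem.Int.floordiv (((i : Int) + 1) * 7) 2) ansl) ' '])

def vsiper_alt (ptxt : String) (key : Int) (v : Int) : String :=
  let ans := genansChars v
  let ansl : Int := ans.length
  String.ofList (vsiperBack ans ansl key ptxt.toList ptxt.toList.length [])

-- ===== PRECONDITION & SPEC =====
def Spec_vsiper (ptxt : String) (key : Int) (v : Int) (out : String) : Prop := out = vsiper_alt ptxt key v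
instance (ptxt : String) (key : Int) (v : Int) (out : String) : Decidable (Spec_vsiper ptxt key v out) := by unfold Spec_vsiper; infer_instance

-- ===== CLAIM (what is proved, stated in full; the proofs are below) =====
def Claim_equal_vsiper : Prop := ∀ (ptxt : String) (key : Int) (v : Int), Dom_vsiper ptxt key v → Spec_vsiper ptxt key v (vsiper ptxt key v)

-- ===== LEMMAS AND PROOFS =====

-- genans only distinguishes v = 2 and v = 3
theorem genans_cases (v : Int) (h2 : v ≠ 2) (h3 : v ≠ 3) : genansChars v = genansChars 0 := by
  simp [genansChars, h2, h3]

-- the three alphabets genans can produce, as literals (decide evaluates the sort once each)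
theorem genans_zero : genansChars 0 = "!#$%&'()+,-0123456789;=@ABCDEFGHIJKLMNOPQRSTUVWXYZ[]^_`abcdefghijklmnopqrstuvwxyz{}~".toList := by decide
theorem genans_two : genansChars 2 = " !#$%&'()+,-.0123456789;=@ABCDEFGHIJKLMNOPQRSTUVWXYZ[]^_`abcdefghijklmnopqrstuvwxyz{}~".toList := by decide
theorem genans_three : genansChars 3 = "!#$%&'()+,-.0123456789;=@ABCDEFGHIJKLMNOPQRSTUVWXYZ[]^_`abcdefghijklmnopqrstuvwxyz{}~".toList := by decide

-- B's binary search agrees with A's linear find for every printable-ASCII character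
set_option maxRecDepth 100000 in
set_option maxHeartbeats 1000000 in
theorem locate_eq_find (v : Int) (c : Char) (hc : pvDomChar c = true) :
    locate (genansChars v) ((genansChars v).length) c = PySem.Chars.find (genansChars v) [c] := by
  have hn : c.toNat < 128 := by
    simp only [pvDomChar, Bool.or_eq_true, Bool.and_eq_true, decide_eq_true_eq, beq_iff_eq] at hc
    omega
  have hco : Char.ofNat c.toNat = c := Char.ofNat_toNat c
  have hans : genansChars v = genansChars 0 ∨ genansChars v = genansChars 2 ∨ genansChars v = genansChars 3 := by
    by_cases h2 : v = 2
    · subst h2; exact Or.inr (Or.inl rfl)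
    by_cases h3 : v = 3
    · subst h3; exact Or.inr (Or.inr rfl)
    exact Or.inl (genans_cases v h2 h3)
  have h0 : ∀ n ∈ List.range 128,
      locate ("!#$%&'()+,-0123456789;=@ABCDEFGHIJKLMNOPQRSTUVWXYZ[]^_`abcdefghijklmnopqrstuvwxyz{}~".toList)
          ("!#$%&'()+,-0123456789;=@ABCDEFGHIJKLMNOPQRSTUVWXYZ[]^_`abcdefghijklmnopqrstuvwxyz{}~".toList.length) (Char.ofNat n)
        = PySem.Chars.find ("!#$%&'()+,-0123456789;=@ABCDEFGHIJKLMNOPQRSTUVWXYZ[]^_`abcdefghijklmnopqrstuvwxyz{}~".toList) [Char.ofNat n] := by decide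
  have h2 : ∀ n ∈ List.range 128,
      locate (" !#$%&'()+,-.0123456789;=@ABCDEFGHIJKLMNOPQRSTUVWXYZ[]^_`abcdefghijklmnopqrstuvwxyz{}~".toList)
          (" !#$%&'()+,-.0123456789;=@ABCDEFGHIJKLMNOPQRSTUVWXYZ[]^_`abcdefghijklmnopqrstuvwxyz{}~".toList.length) (Char.ofNat n)
        = PySem.Chars.find (" !#$%&'()+,-.0123456789;=@ABCDEFGHIJKLMNOPQRSTUVWXYZ[]^_`abcdefghijklmnopqrstuvwxyz{}~".toList) [Char.ofNat n] := by decide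
  have h3 : ∀ n ∈ List.range 128,
      locate ("!#$%&'()+,-.0123456789;=@ABCDEFGHIJKLMNOPQRSTUVWXYZ[]^_`abcdefghijklmnopqrstuvwxyz{}~".toList)
          ("!#$%&'()+,-.0123456789;=@ABCDEFGHIJKLMNOPQRSTUVWXYZ[]^_`abcdefghijklmnopqrstuvwxyz{}~".toList.length) (Char.ofNat n)
        = PySem.Chars.find ("!#$%&'()+,-.0123456789;=@ABCDEFGHIJKLMNOPQRSTUVWXYZ[]^_`abcdefghijklmnopqrstuvwxyz{}~".toList) [Char.ofNat n] := by decide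
  have hm := List.mem_range.mpr hn
  rcases hans with h | h | h
  · rw [h, genans_zero]; have := h0 c.toNat hm; rwa [hco] at this
  · rw [h, genans_two]; have := h2 c.toNat hm; rwa [hco] at this
  · rw [h, genans_three]; have := h3 c.toNat hm; rwa [hco] at this

-- canonical form shared by both loops
def canonF (ans : List Char) (ansl key : Int) (pt : List Char) : List Char :=
  if pt.any (fun c => decide (PySem.Chars.find ans [c] = -1)) then []
  else (PySem.List.enumerate pt 0).map (fun p =>
    PySem.List.pyGetD ans
      (PySem.Int.mod (PySem.Chars.find ans [p.2] + key - PySem.Int.floordiv ((p.1 + 1) * 7) 2) ansl) ' ')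

-- A's forward loop computes the canonical form
theorem aLoop_eq (ans : List Char) (ansl key : Int) :
    ∀ (l : List Char) (s : Int) (acc : List Char),
    vsiperLoop ans ansl key l s acc =
      (if l.any (fun c => decide (PySem.Chars.find ans [c] = -1)) then []
       else acc ++ (PySem.List.enumerate l s).map (fun p =>
         PySem.List.pyGetD ans
           (PySem.Int.mod (PySem.Chars.find ans [p.2] + key - PySem.Int.floordiv ((p.1 + 1) * 7) 2) ansl) ' ')) := by
  intro l
  induction l with
  | nil => intro s acc; simp [vsiperLoop, PySem.List.enumerate]
  | cons c t ih =>
    intro s acc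
    rw [vsiperLoop]
    by_cases hf : PySem.Chars.find ans [c] = -1
    · simp [hf]
    · rw [if_neg hf, ih]
      rw [PySem.List.enumerate_cons]
      simp only [List.any_cons, hf, decide_false, Bool.false_or, List.map_cons]
      by_cases ht : t.any (fun c => decide (PySem.Chars.find ans [c] = -1)) = true
      · simp [ht]
      · simp only [Bool.not_eq_true] at ht
        simp [ht, List.append_assoc]

-- B's backward loop computes the canonical form on its processed prefix
theorem bLoop_eq (ans : List Char) (ansl key : Int)
    (hloc : ∀ c, pvDomChar c = true → locate ans ansl c = PySem.Chars.find ans [c])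
    (pt : List Char) (hdom : ∀ c ∈ pt, pvDomChar c = true) :
    ∀ (i : Nat), i ≤ pt.length → ∀ (out : List Char),
    vsiperBack ans ansl key pt i out =
      (if (pt.take i).any (fun c => decide (PySem.Chars.find ans [c] = -1)) then []
       else (PySem.List.enumerate (pt.take i) 0).map (fun p =>
         PySem.List.pyGetD ans
           (PySem.Int.mod (PySem.Chars.find ans [p.2] + key - PySem.Int.floordiv ((p.1 + 1) * 7) 2) ansl) ' ')
         ++ out.reverse) := by
  intro i
  induction i with
  | zero => intro _ out; simp [vsiperBack]
  | succ i ih =>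
    intro hle out
    have hi : i < pt.length := by omega
    have hget : PySem.List.pyGetD pt (i : Int) ' ' = pt[i] := by
      rw [PySem.List.pyGetD_natCast]; simp [List.getD, hi]
    have hmem : pt[i] ∈ pt := List.getElem_mem hi
    have htake : pt.take (i + 1) = pt.take i ++ [pt[i]] := by
      rw [List.take_add_one]; simp [hi]
    rw [vsiperBack]
    simp only [hget, hloc _ (hdom _ hmem)]
    by_cases hf : PySem.Chars.find ans [pt[i]] = -1
    · rw [if_pos hf, htake]
      have hx : ((pt.take i ++ [pt[i]]).any (fun c => decide (PySem.Chars.find ans [c] = -1))) = true := by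
        simp only [List.any_append, List.any_cons, List.any_nil, hf, decide_true,
          Bool.true_or, Bool.or_true]
      rw [if_pos hx]
    · rw [if_neg hf, ih (by omega)]
      rw [htake, PySem.List.enumerate_append]
      have hlen : (pt.take i).length = i := by simp [Nat.min_eq_left (le_of_lt hi)]
      simp only [List.any_append, List.any_cons, List.any_nil, hf, decide_false,
        Bool.or_false, Bool.false_or]
      by_cases ht : (pt.take i).any (fun c => decide (PySem.Chars.find ans [c] = -1)) = true
      · simp [ht]
      · simp only [Bool.not_eq_true] at ht
        simp only [ht, Bool.false_eq_true, if_false, hlen]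
        rw [List.reverse_append]
        simp [PySem.List.enumerate, List.append_assoc]

-- ===== VERDICT (by name: the statement is the Claim_ definition above) =====
theorem vsiper_spec : Claim_equal_vsiper := by
  intro ptxt key v hdom
  unfold Spec_vsiper vsiper vsiper_alt
  dsimp only
  have hchars : ∀ c ∈ ptxt.toList, pvDomChar c = true := by
    unfold Dom_vsiper pvDomStr at hdom
    simp only [Bool.and_eq_true, List.all_eq_true] at hdom
    exact hdom.1.1
  rw [aLoop_eq, bLoop_eq (genansChars v) ((genansChars v).length : Int) key
      (fun c hc => locate_eq_find v c hc) ptxt.toList hchars ptxt.toList.length (le_refl _)]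
  simp only [List.take_length, List.reverse_nil, List.append_nil, List.nil_append]
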